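-- pv_equiv track=rewrite | github.com/Aditya-Agrawal-07/COL100-Assignments | 2021AM10198_ASSIGNMENT8/2021AM10198-q.py | get_position_inside_block
-- ===== SOURCE A (Python) =====
-- from typing import Tuple, List
--
-- def get_position_inside_block(sudoku:List[List[int]], pos:Tuple[int, int]) -> int:
-- 	"""This function takes parameter position
-- 	and returns the index of the position inside the corresponding block.
-- 	"""
-- 	# your code goes here
-- 	d=0
-- 	c=0
-- 	a=(pos[0]-1)%3
-- 	b=(pos[1]-1)%3
-- 	for i in range(3):
-- 		if i==a:
-- 			for j in range(3):
-- 				c+=1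
-- 				if j==b:
-- 					d='break'
-- 					break
-- 		else:
-- 			c+=3
-- 		if d=='break':
-- 			break
-- 	return c
-- ===== SOURCE B (Python) =====
-- from typing import Tuple, List
--
-- def get_position_inside_block(sudoku: List[List[int]], pos: Tuple[int, int]) -> int:
--     """Index of the position inside its 3x3 block, closed form."""
--     return 3 * ((pos[0] - 1) % 3) + (pos[1] - 1) % 3 + 1
-- ===== Notes on version B (the rewrite author's own statement) =====
-- stated objective: simpler
-- what changed: Replaced the nested counting loops with a break flag by the closed-form arithmetic 3*((pos[0]-1)%3)+(pos[1]-1)%3+1.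
import Mathlib
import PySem

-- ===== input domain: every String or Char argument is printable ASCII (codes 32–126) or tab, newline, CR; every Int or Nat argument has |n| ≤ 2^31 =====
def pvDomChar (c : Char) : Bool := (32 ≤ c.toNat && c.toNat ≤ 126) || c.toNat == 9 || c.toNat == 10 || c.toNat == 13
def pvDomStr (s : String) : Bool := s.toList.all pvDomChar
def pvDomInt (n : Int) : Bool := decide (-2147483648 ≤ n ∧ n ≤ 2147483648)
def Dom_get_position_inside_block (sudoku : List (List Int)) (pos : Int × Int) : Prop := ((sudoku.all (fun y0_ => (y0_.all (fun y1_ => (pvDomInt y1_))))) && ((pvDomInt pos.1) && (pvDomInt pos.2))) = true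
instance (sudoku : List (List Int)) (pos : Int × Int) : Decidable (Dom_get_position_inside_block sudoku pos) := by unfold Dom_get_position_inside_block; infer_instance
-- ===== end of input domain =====

-- B replaces A's nested counting loops by the closed-form 3*((pos[0]-1)%3)+(pos[1]-1)%3+1 (simpler).


-- ===== PORT A =====
-- Literal port of A: d is 0/'break'; we carry the flag d=='break' as a Bool.
def get_position_inside_block (sudoku : List (List Int)) (pos : Int × Int) : Int :=
  let a : Int := PySem.Int.mod (pos.1 - 1) 3
  let b : Int := PySem.Int.mod (pos.2 - 1) 3
  -- inner loop: for j in range(3): c+=1; if j==b: d='break'; break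
  let inner : Int → Bool × Int := fun c =>
    (PySem.List.pyRange 0 3 1).foldl
      (fun (st : Bool × Int) j =>
        if st.1 then st
        else
          let c' := st.2 + 1
          if j = b then (true, c') else (false, c'))
      (false, c)
  let res :=
    (PySem.List.pyRange 0 3 1).foldl
      (fun (st : Bool × Int) i =>
        if st.1 then st  -- d=='break' already fired: loop broken
        else
          let st' := if i = a then inner st.2 else (false, st.2 + 3)
          st')
      (false, 0)
  res.2

-- ===== PORT B =====
def get_position_inside_block_alt (sudoku : List (List Int)) (pos : Int × Int) : Int :=
  3 * PySem.Int.mod (pos.1 - 1) 3 + PySem.Int.mod (pos.2 - 1) 3 + 1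

-- ===== PRECONDITION & SPEC =====
def Spec_get_position_inside_block (sudoku : List (List Int)) (pos : Int × Int) (out : Int) : Prop := out = get_position_inside_block_alt sudoku pos
instance (sudoku : List (List Int)) (pos : Int × Int) (out : Int) : Decidable (Spec_get_position_inside_block sudoku pos out) := by unfold Spec_get_position_inside_block; infer_instance

-- ===== CLAIM (what is proved, stated in full; the proofs are below) =====
def Claim_equal_get_position_inside_block : Prop := ∀ (sudoku : List (List Int)) (pos : Int × Int), Dom_get_position_inside_block sudoku pos → Spec_get_position_inside_block sudoku pos (get_position_inside_block sudoku pos)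

-- ===== LEMMAS AND PROOFS =====

-- ===== VERDICT (by name: the statement is the Claim_ definition above) =====
theorem get_position_inside_block_spec : Claim_equal_get_position_inside_block := by
  intro sudoku pos _
  unfold Spec_get_position_inside_block get_position_inside_block get_position_inside_block_alt
  have hm1 : PySem.Int.mod (pos.1 - 1) 3 = (pos.1 - 1) % 3 := by
    norm_num [PySem.Int.mod, Int.fmod_eq_emod]
  have hm2 : PySem.Int.mod (pos.2 - 1) 3 = (pos.2 - 1) % 3 := by
    norm_num [PySem.Int.mod, Int.fmod_eq_emod]
  rw [hm1, hm2]
  have ha : (pos.1 - 1) % 3 = 0 ∨ (pos.1 - 1) % 3 = 1 ∨ (pos.1 - 1) % 3 = 2 := by omega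
  have hb : (pos.2 - 1) % 3 = 0 ∨ (pos.2 - 1) % 3 = 1 ∨ (pos.2 - 1) % 3 = 2 := by omega
  rcases ha with h1 | h1 | h1 <;> rcases hb with h2 | h2 | h2 <;>
    simp only [h1, h2] <;> decide
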